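-- pv_equiv track=rewrite | github.com/peterwilliams97/aoc | aoc2024-day5.py | validate_one_update
-- ===== SOURCE A (Python) =====
-- def validate_one_update(rule_sets, update):
--     for i, u in enumerate(update):
--         if u not in rule_sets:
--             continue
--         for j, v in enumerate(update[:i]):
--             s = rule_sets[u]
--             if v in s:
--                 fixed = update
--                 fixed[i] = v
--                 fixed[j] = u
--                 return fixed, True
--     return update, False
-- ===== SOURCE B (Python) =====
-- def validate_one_update(rule_sets, update):
--     # One pass with a first-occurrence position index; mutates `update` in place
--     # exactly like the original (same swap) before returning it.
--     pos = {}
--     for i, u in enumerate(update):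
--         s = rule_sets.get(u)
--         if s is not None:
--             js = [pos[v] for v in s if v in pos]
--             if js:
--                 j = min(js)
--                 update[i], update[j] = update[j], update[i]
--                 return update, True
--         pos.setdefault(u, i)
--     return update, False
-- ===== Notes on version B (the rewrite author's own statement) =====
-- stated objective: alternative
-- what changed: Instead of rescanning the whole prefix update[:i] for each element, B maintains a dict of first-occurrence positions and, for each element with a rule set, takes the minimum recorded position among the rule set's members; the quadratic prefix scan disappears and the inner iteration runs over the rule set instead.
import Mathlib
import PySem

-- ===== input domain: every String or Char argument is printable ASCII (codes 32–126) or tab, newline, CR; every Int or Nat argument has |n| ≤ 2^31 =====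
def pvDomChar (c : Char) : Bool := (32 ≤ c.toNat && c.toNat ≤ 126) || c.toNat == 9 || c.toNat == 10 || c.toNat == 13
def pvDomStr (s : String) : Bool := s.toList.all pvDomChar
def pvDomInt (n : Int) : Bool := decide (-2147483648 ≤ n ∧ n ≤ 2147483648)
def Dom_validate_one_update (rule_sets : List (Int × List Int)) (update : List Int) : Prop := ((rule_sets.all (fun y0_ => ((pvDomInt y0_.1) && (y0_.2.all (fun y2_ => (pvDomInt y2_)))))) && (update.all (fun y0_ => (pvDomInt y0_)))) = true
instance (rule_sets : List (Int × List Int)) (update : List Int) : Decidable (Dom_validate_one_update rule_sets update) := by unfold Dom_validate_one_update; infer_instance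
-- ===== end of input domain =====

-- B replaces A's quadratic prefix rescan by a first-occurrence position dict plus a
-- minimum over the rule set's recorded positions (objective: alternative algorithm).
-- Both Pythons mutate `update` in place with the same swap; equivalence here is
-- about the returned value.

-- ===== PORT A =====
-- inner loop: for j, v in enumerate(update[:i]): s fixed by the guard; on hit
-- perform fixed[i] = v; fixed[j] = u and return (fixed, True)
def pvAInner (update : List Int) (i u : Int) (s : List Int) :
    List (Int × Int) → Option (List Int × Bool)
  | [] => none
  | (j, v) :: rest =>
    if v ∈ s then
      some (PySem.List.pySetD (PySem.List.pySetD update i v) j u, true)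
    else pvAInner update i u s rest

-- outer loop: for i, u in enumerate(update); `u in rule_sets` and `rule_sets[u]`
-- are combined into one first-match lookup (exact: the subscript is guarded by the
-- membership test, so it never raises)
def pvAOuter (rule_sets : List (Int × List Int)) (update : List Int) :
    List (Int × Int) → List Int × Bool
  | [] => (update, false)
  | (i, u) :: rest =>
    match (PySem.Dict.mk rule_sets).get? u with
    | none => pvAOuter rule_sets update rest
    | some s =>
      match pvAInner update i u s (PySem.List.enumerate (PySem.List.slice update none (some i)) 0) with
      | some out => out
      | none => pvAOuter rule_sets update rest

def validate_one_update (rule_sets : List (Int × List Int)) (update : List Int) : List Int × Bool :=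
  pvAOuter rule_sets update (PySem.List.enumerate update 0)

-- ===== PORT B =====
-- for i, u in enumerate(update): s = rule_sets.get(u); js = [pos[v] for v in s if v in pos];
-- if js: j = min(js); simultaneous swap update[i], update[j]; else pos.setdefault(u, i)
-- (indices i, j are in range by construction, so the guarded subscripts never raise)
def pvBLoop (rule_sets : List (Int × List Int)) (update : List Int)
    (pos : PySem.Dict Int Int) : List (Int × Int) → List Int × Bool
  | [] => (update, false)
  | (i, u) :: rest =>
    match (PySem.Dict.mk rule_sets).get? u with
    | some s =>
      let js := s.filterMap (fun v => pos.get? v)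
      match PySem.List.min? js (fun x => x) with
      | some j =>
        (PySem.List.pySetD (PySem.List.pySetD update i (PySem.List.pyGetD update j 0)) j
          (PySem.List.pyGetD update i 0), true)
      | none => pvBLoop rule_sets update (pos.setdefault u i) rest
    | none => pvBLoop rule_sets update (pos.setdefault u i) rest

def validate_one_update_alt (rule_sets : List (Int × List Int)) (update : List Int) : List Int × Bool :=
  pvBLoop rule_sets update PySem.Dict.empty (PySem.List.enumerate update 0)

-- ===== PRECONDITION & SPEC =====
def Spec_validate_one_update (rule_sets : List (Int × List Int)) (update : List Int) (out : List Int × Bool) : Prop := out = validate_one_update_alt rule_sets update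
instance (rule_sets : List (Int × List Int)) (update : List Int) (out : List Int × Bool) : Decidable (Spec_validate_one_update rule_sets update out) := by unfold Spec_validate_one_update; infer_instance

-- ===== CLAIM (what is proved, stated in full; the proofs are below) =====
def Claim_equal_validate_one_update : Prop := ∀ (rule_sets : List (Int × List Int)) (update : List Int), Dom_validate_one_update rule_sets update → Spec_validate_one_update rule_sets update (validate_one_update rule_sets update)

-- ===== LEMMAS AND PROOFS =====

-- first index (from k) of v in p
def pvFIdx (v : Int) : List Int → Int → Option Int
  | [], _ => none
  | w :: t, k => if w = v then some k else pvFIdx v t (k + 1)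

-- first (index, value) pair (from k) of p whose value lies in s
def pvFirstHit (s : List Int) : List Int → Int → Option (Int × Int)
  | [], _ => none
  | v :: t, k => if v ∈ s then some (k, v) else pvFirstHit s t (k + 1)

-- pos dict after scanning p with indices starting at k, from initial dict d
def pvPosFrom (p : List Int) (k : Int) (d : PySem.Dict Int Int) : PySem.Dict Int Int :=
  (PySem.List.enumerate p k).foldl (fun d q => d.setdefault q.2 q.1) d

theorem pvPosFrom_nil (k : Int) (d : PySem.Dict Int Int) : pvPosFrom [] k d = d := rfl

theorem pvPosFrom_cons (w : Int) (t : List Int) (k : Int) (d : PySem.Dict Int Int) :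
    pvPosFrom (w :: t) k d = pvPosFrom t (k + 1) (d.setdefault w k) := by
  simp [pvPosFrom, PySem.List.enumerate_cons]

theorem pvPosFrom_get (p : List Int) : ∀ (k : Int) (d : PySem.Dict Int Int) (v : Int),
    (pvPosFrom p k d).get? v = ((d.get? v).orElse (fun _ => pvFIdx v p k)) := by
  induction p with
  | nil =>
    intro k d v
    rw [pvPosFrom_nil]
    cases d.get? v <;> simp [pvFIdx, Option.orElse]
  | cons w t ih =>
    intro k d v
    rw [pvPosFrom_cons, ih]
    by_cases hv : w = v
    · subst hv
      rw [PySem.Dict.get?_setdefault_self]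
      cases d.get? w <;> simp [pvFIdx, Option.orElse]
    · rw [PySem.Dict.get?_setdefault_of_ne d k (Ne.symm hv)]
      simp [pvFIdx, hv]

theorem pvFIdx_shift (v : Int) (p : List Int) : ∀ (k : Int),
    pvFIdx v p k = (pvFIdx v p 0).map (fun x => k + x) := by
  induction p with
  | nil => intro k; simp [pvFIdx]
  | cons w t ih =>
    intro k
    by_cases hw : w = v
    · simp [pvFIdx, hw]
    · simp only [pvFIdx, if_neg hw]
      rw [ih (k + 1), ih (0 + 1)]
      cases pvFIdx v t 0
      · simp
      · simp; omega

theorem pvFirstHit_shift (s p : List Int) : ∀ (k : Int),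
    pvFirstHit s p k = (pvFirstHit s p 0).map (fun q => (k + q.1, q.2)) := by
  induction p with
  | nil => intro k; simp [pvFirstHit]
  | cons v t ih =>
    intro k
    by_cases hv : v ∈ s
    · simp [pvFirstHit, hv]
    · simp only [pvFirstHit, if_neg hv]
      rw [ih (k + 1), ih (0 + 1)]
      cases pvFirstHit s t 0
      · simp
      · simp; omega

theorem pvFIdx_nonneg (v : Int) (p : List Int) : ∀ (k j : Int), 0 ≤ k →
    pvFIdx v p k = some j → 0 ≤ j := by
  induction p with
  | nil => intro k j _ h; simp [pvFIdx] at h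
  | cons w t ih =>
    intro k j hk h
    simp only [pvFIdx] at h
    split at h
    · simp at h; omega
    · exact ih (k + 1) j (by omega) h

-- min of a shifted Int list
theorem pv_foldl_min_shift (c : Int) (t : List Int) : ∀ (a : Int),
    (t.map (fun x => c + x)).foldl min (c + a) = c + t.foldl min a := by
  induction t with
  | nil => intro a; simp
  | cons b t ih =>
    intro a
    simp only [List.map_cons, List.foldl_cons]
    have hmin : min (c + a) (c + b) = c + min a b := by
      rcases le_total a b with hab | hab
      · rw [min_eq_left (by omega), min_eq_left hab]
      · rw [min_eq_right (by omega), min_eq_right hab]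
    rw [hmin]
    exact ih (min a b)

theorem pv_min?_shift (c : Int) (l : List Int) :
    PySem.List.min? (l.map (fun x => c + x)) (fun x => x) =
      (PySem.List.min? l (fun x => x)).map (fun x => c + x) := by
  cases l with
  | nil => simp [PySem.List.min?]
  | cons a t =>
    rw [List.map_cons, PySem.List.min?_id_cons, PySem.List.min?_id_cons]
    simp [pv_foldl_min_shift c t a]

theorem pv_min?_zero (l : List Int) (h0 : (0:Int) ∈ l) (hn : ∀ x ∈ l, (0:Int) ≤ x) :
    PySem.List.min? l (fun x => x) = some 0 := by
  cases hm : PySem.List.min? l (fun x => x) with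
  | none =>
    rw [PySem.List.min?_eq_none_iff] at hm
    subst hm; simp at h0
  | some m =>
    have h1 := PySem.List.min?_isMin hm 0 h0
    have h2 := hn m (PySem.List.min?_mem hm)
    simp only at h1
    have hm0 : m = (0:Int) := by omega
    rw [hm0]

-- core: B's minimum over recorded positions = A's first hit in the prefix
theorem pv_min_eq_firstHit (s : List Int) (p : List Int) :
    PySem.List.min? (s.filterMap (fun v => pvFIdx v p 0)) (fun x => x) =
      (pvFirstHit s p 0).map (fun q => q.1) := by
  induction p with
  | nil =>
    have : (fun v => pvFIdx v ([]:List Int) 0) = fun _ => (none : Option Int) := by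
      funext v; simp [pvFIdx]
    simp [this, pvFirstHit, PySem.List.min?]
  | cons w t ih =>
    by_cases hw : w ∈ s
    · -- first hit at index 0; 0 is in the list and everything is ≥ 0
      have hmem : (0:Int) ∈ s.filterMap (fun v => pvFIdx v (w :: t) 0) := by
        rw [List.mem_filterMap]
        exact ⟨w, hw, by simp [pvFIdx]⟩
      have hnn : ∀ x ∈ s.filterMap (fun v => pvFIdx v (w :: t) 0), (0:Int) ≤ x := by
        intro x hx
        rw [List.mem_filterMap] at hx
        obtain ⟨v, _, hv⟩ := hx
        exact pvFIdx_nonneg v (w :: t) 0 x (le_refl 0) hv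
      rw [pv_min?_zero _ hmem hnn]
      simp [pvFirstHit, hw]
    · -- w contributes nothing; everything shifts by one
      have hfun : ∀ v ∈ s, pvFIdx v (w :: t) 0 = (pvFIdx v t 0).map (fun x => 1 + x) := by
        intro v hv
        have hne : w ≠ v := fun h => hw (h ▸ hv)
        simp only [pvFIdx, if_neg hne]
        exact pvFIdx_shift v t 1
      have hfm : s.filterMap (fun v => pvFIdx v (w :: t) 0) =
          (s.filterMap (fun v => pvFIdx v t 0)).map (fun x => 1 + x) := by
        rw [List.map_filterMap]
        exact List.filterMap_congr hfun
      rw [hfm, pv_min?_shift, ih]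
      simp only [pvFirstHit, if_neg hw]
      rw [pvFirstHit_shift s t (0 + 1)]
      cases pvFirstHit s t 0 <;> simp

-- A's inner loop in terms of pvFirstHit
theorem pvAInner_eq (update : List Int) (i u : Int) (s : List Int) (p : List Int) :
    ∀ (k : Int), pvAInner update i u s (PySem.List.enumerate p k) =
      (pvFirstHit s p k).map
        (fun q => (PySem.List.pySetD (PySem.List.pySetD update i q.2) q.1 u, true)) := by
  induction p with
  | nil => intro k; simp [PySem.List.enumerate_nil, pvAInner, pvFirstHit]
  | cons v t ih =>
    intro k
    rw [PySem.List.enumerate_cons]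
    by_cases hv : v ∈ s
    · simp [pvAInner, pvFirstHit, hv]
    · simp only [pvAInner, if_neg hv, pvFirstHit]
      exact ih (k + 1)

-- where the first hit lands: a genuine index into the prefix, with its value
theorem pvFirstHit_spec (s : List Int) (p : List Int) : ∀ (j v : Int),
    pvFirstHit s p 0 = some (j, v) →
      ∃ jn : Nat, j = (jn : Int) ∧ jn < p.length ∧ p[jn]? = some v := by
  induction p with
  | nil => intro j v h; simp [pvFirstHit] at h
  | cons w t ih =>
    intro j v h
    simp only [pvFirstHit] at h
    split at h
    · simp only [Option.some.injEq, Prod.mk.injEq] at h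
      exact ⟨0, by omega, by simp, by simp [← h.2]⟩
    · rw [pvFirstHit_shift s t (0 + 1)] at h
      cases ht : pvFirstHit s t 0 with
      | none => rw [ht] at h; simp at h
      | some q =>
        rw [ht] at h
        simp only [Option.map_some, Option.some.injEq, Prod.mk.injEq] at h
        obtain ⟨jn, hj, hlt, hval⟩ := ih q.1 q.2 (by rw [ht])
        refine ⟨jn + 1, by omega, by simp; omega, ?_⟩
        simp only [List.getElem?_cons_succ]
        rw [hval, ← h.2]

-- value lookups for the swap
theorem pv_getD_left (pre rest : List Int) (jn : Nat) (v : Int) (h : jn < pre.length)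
    (hv : pre[jn]? = some v) :
    PySem.List.pyGetD (pre ++ rest) (jn : Int) 0 = v := by
  rw [PySem.List.pyGetD_natCast]
  have hx : (pre ++ rest)[jn]? = some v := by
    rw [List.getElem?_append_left h]; exact hv
  rw [List.getD, hx]
  rfl

theorem pv_getD_mid (pre : List Int) (u : Int) (rest : List Int) :
    PySem.List.pyGetD (pre ++ u :: rest) ((pre.length : Nat) : Int) 0 = u := by
  rw [PySem.List.pyGetD_natCast]
  have hx : (pre ++ u :: rest)[pre.length]? = some u := by
    rw [List.getElem?_append_right (le_refl _)]
    simp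
  rw [List.getD, hx]
  rfl

-- main loop correspondence
theorem pv_loop_eq (rule_sets : List (Int × List Int)) :
    ∀ (rest pre : List Int),
      pvAOuter rule_sets (pre ++ rest) (PySem.List.enumerate rest (pre.length : Int)) =
      pvBLoop rule_sets (pre ++ rest) (pvPosFrom pre 0 PySem.Dict.empty)
        (PySem.List.enumerate rest (pre.length : Int)) := by
  intro rest
  induction rest with
  | nil => intro pre; simp [PySem.List.enumerate_nil, pvAOuter, pvBLoop]
  | cons u rest' ih =>
    intro pre
    rw [PySem.List.enumerate_cons]
    have hpos : (pvPosFrom pre 0 PySem.Dict.empty).setdefault u (pre.length : Int) =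
        pvPosFrom (pre ++ [u]) 0 PySem.Dict.empty := by
      simp [pvPosFrom, PySem.List.enumerate_append, List.foldl_append]
    have happ : pre ++ u :: rest' = (pre ++ [u]) ++ rest' := by simp
    have hlen : (pre.length : Int) + 1 = ((pre ++ [u]).length : Int) := by simp
    cases hget : (PySem.Dict.mk rule_sets).get? u with
    | none =>
      simp only [pvAOuter, pvBLoop, hget]
      rw [hpos, hlen, happ]
      exact ih (pre ++ [u])
    | some s =>
      simp only [pvAOuter, pvBLoop, hget]
      have hslice : PySem.List.slice (pre ++ u :: rest') none (some ((pre.length : Nat) : Int)) = pre := by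
        rw [PySem.List.slice_to_natCast]
        exact List.take_left
      rw [hslice, pvAInner_eq]
      have hjs : s.filterMap (fun v => (pvPosFrom pre 0 PySem.Dict.empty).get? v) =
          s.filterMap (fun v => pvFIdx v pre 0) := by
        apply List.filterMap_congr
        intro v _
        rw [pvPosFrom_get]
        simp [Option.orElse]
      simp only [hjs]
      rw [pv_min_eq_firstHit]
      cases hfh : pvFirstHit s pre 0 with
      | none =>
        simp only [Option.map_none]
        rw [hpos, hlen, happ]
        exact ih (pre ++ [u])
      | some q =>
        obtain ⟨jn, hj, hlt, hval⟩ := pvFirstHit_spec s pre q.1 q.2 (by rw [hfh])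
        simp only [Option.map_some]
        rw [hj, pv_getD_left pre (u :: rest') jn q.2 hlt hval, pv_getD_mid pre u rest']

-- ===== VERDICT (by name: the statement is the Claim_ definition above) =====
theorem validate_one_update_spec : Claim_equal_validate_one_update := by
  intro rule_sets update _
  unfold Spec_validate_one_update validate_one_update validate_one_update_alt
  have h := pv_loop_eq rule_sets update []
  simpa [pvPosFrom_nil] using h
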